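-- pv_equiv track=rewrite | github.com/chunbo777/CODING_TEST | dev/dev1.py | solution
-- ===== SOURCE A (Python) =====
-- def solution(drum):
--     drum = [list(d) for d in drum]
--     posit = len(drum[0])
--     k =0
--     for p in range(posit):
--         y = 0
--         start = drum[y][p]
--         star = 0
--         while True:
--             start, drum, y, p, star = direction(start, drum, y, p, star)
--             if start == False:
--                 k +=1
--                 break
--             if start == "a":
--                 break
--     return k
--
-- def direction(start, drum, y, p, star = 0):
--     try:
--         if start == "#":
--             start = drum[y+1][p] #한 칸 내려가기
--             y = y+1
--         elif start == ">":
--             start = drum[y][p+1]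
--             p = p+1
--         elif start == "<":
--             start = drum[y][p-1]
--             p = p-1
--         elif start == "*":
--             start = drum[y+1][p]
--             star += 1
--             y += 1
--             if star > 1 :
--                 return "a",drum,"c","d","e"
--
--         return start, drum, y, p, star
--     except:
--         return False, drum, False, False, False
-- ===== SOURCE B (Python) =====
-- def solution(drum):
--     # Each (row, column, stars-passed) state is resolved once and cached; later
--     # columns reuse the cached outcome of shared path suffixes.
--     memo = {}
--     exits = 0
--     for start_col in range(len(drum[0])):
--         state = (0, start_col, 0)
--         path = []
--         while state not in memo:
--             path.append(state)
--             y, p, star = state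
--             try:
--                 c = drum[y][p]
--             except IndexError:
--                 out = True          # rolled off the grid: the ball exits
--                 break
--             if star > 1:
--                 out = False         # passed a second star: the ball is stuck
--                 break
--             if c == '#':
--                 state = (y + 1, p, star)
--             elif c == '>':
--                 state = (y, p + 1, star)
--             elif c == '<':
--                 state = (y, p - 1, star)
--             elif c == '*':
--                 state = (y + 1, p, star + 1)
--             else:
--                 out = False         # resting cell: the ball stops here
--                 break
--         else:
--             out = memo[state]
--         for s in path:
--             memo[s] = out
--         exits += out
--     return exits
-- ===== Notes on version B (the rewrite author's own statement) =====
-- stated objective: alternative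
-- what changed: A re-simulates the ball's full path from the top for every start column; B walks the deterministic state graph once, caching the outcome of every visited (row, column, stars-passed) state in a dict and backfilling the walked path, so shared path suffixes are resolved only once; Pre_ restricts to the puzzle's drum alphabet and excludes the empty drum (A raises IndexError) and '><' two-cell cycle patterns, on which A loops forever when the ball reaches them.
-- outside the precondition, e.g. on solution([]): A raises IndexError, B raises IndexError; on solution(['aa', '><']): A returns 0, B returns 0; on solution(['a', 'x']): A returns 0, B returns 0
import Mathlib
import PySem

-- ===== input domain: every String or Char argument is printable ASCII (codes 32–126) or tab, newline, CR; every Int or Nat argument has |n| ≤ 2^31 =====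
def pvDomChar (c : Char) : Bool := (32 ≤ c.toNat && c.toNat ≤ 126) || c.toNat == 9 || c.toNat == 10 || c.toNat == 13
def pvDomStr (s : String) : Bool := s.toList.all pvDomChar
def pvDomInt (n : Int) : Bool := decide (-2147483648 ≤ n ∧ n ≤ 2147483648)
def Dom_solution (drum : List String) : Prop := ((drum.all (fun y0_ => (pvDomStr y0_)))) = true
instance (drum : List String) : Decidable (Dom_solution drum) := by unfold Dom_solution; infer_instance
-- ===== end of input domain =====

-- B replaces A's per-column re-walk by a single memoized walk over the deterministic
-- state graph: each (row, column, stars) state is resolved once (objective: alternative).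

-- ===== PORT A =====

-- Python's `start` after `direction` is a 1-char string or False: Option Char
-- (none = False; the sentinel "a" is the same value as the grid character 'a').

-- drum[y][p] under Python indexing (negative index counts from the end; none = IndexError)
def cellA (g : List (List Char)) (y p : Int) : Option Char :=
  match PySem.List.pyGet? g y with
  | none => none
  | some row => PySem.List.pyGet? row p

-- fuel for the `while True` loops (ample under Pre_, see termination lemmas below)
def fuelGrid (g : List (List Char)) : Nat :=
  (g.map (fun r => 2 * r.length + 2)).sum + 2

def direction (start : Char) (drum : List (List Char)) (y p star : Int) :
    Option Char × List (List Char) × Int × Int × Int :=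
  if start = '#' then
    match cellA drum (y + 1) p with
    | some c => (some c, drum, y + 1, p, star)
    | none => (none, drum, 0, 0, 0)      -- except: (False, drum, False, False, False)
  else if start = '>' then
    match cellA drum y (p + 1) with
    | some c => (some c, drum, y, p + 1, star)
    | none => (none, drum, 0, 0, 0)
  else if start = '<' then
    match cellA drum y (p - 1) with
    | some c => (some c, drum, y, p - 1, star)
    | none => (none, drum, 0, 0, 0)
  else if start = '*' then
    match cellA drum (y + 1) p with
    | some c =>
        if star + 1 > 1 then (some 'a', drum, 0, 0, 0)  -- return "a","c","d","e"
        else (some c, drum, y + 1, p, star + 1)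
    | none => (none, drum, 0, 0, 0)
  else (some start, drum, y, p, star)

-- the `while True` loop of A; true = the `start == False` break (k += 1);
-- `start == "a"` (the sentinel, or a grid character 'a') breaks without counting
def loopA : Nat → List (List Char) → Char → Int → Int → Int → Bool
  | 0, _, _, _, _, _ => false
  | n + 1, d, start, y, p, star =>
    match direction start d y p star with
    | (none, _, _, _, _) => true
    | (some c, d', y', p', star') => if c = 'a' then false else loopA n d' c y' p' star'

def solution (drum : List String) : Int :=
  match drum with
  | [] => 0          -- Python raises IndexError on len(drum[0]); excluded by Pre_
  | d0 :: rest =>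
    let g := List.map (fun s => s.toList) (d0 :: rest)
    let r0 := d0.toList
    (PySem.List.pyRange 0 (r0.length : Int) 1).foldl
      (fun k p =>
        match PySem.List.pyGet? r0 p with            -- start = drum[0][p]
        | none => k                                  -- unreachable: p < len(drum[0])
        | some st => if loopA (fuelGrid g) g st 0 p 0 then k + 1 else k)
      0

-- ===== PORT B =====

-- B's `drum[y][p]` inside `try … except IndexError` (none = IndexError)
def cellB (g : List (List Char)) (y p : Int) : Option Char :=
  (PySem.List.pyGet? g y).bind (fun row => PySem.List.pyGet? row p)

-- B's inner `while state not in memo` walk: returns (out, visited states to backfill)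
def walkB (g : List (List Char)) : Nat → PySem.Dict (Int × Int × Int) Bool →
    List (Int × Int × Int) → Int × Int × Int → Bool × List (Int × Int × Int)
  | 0, _, path, _ => (false, path)
  | n + 1, memo, path, st =>
    match memo.get? st with
    | some out => (out, path)
    | none =>
      match cellB g st.1 st.2.1 with
      | none => (true, st :: path)           -- rolled off the grid: the ball exits
      | some c =>
        if st.2.2 > 1 then (false, st :: path)   -- passed a second star: stuck
        else if c = '#' then walkB g n memo (st :: path) (st.1 + 1, st.2.1, st.2.2)
        else if c = '>' then walkB g n memo (st :: path) (st.1, st.2.1 + 1, st.2.2)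
        else if c = '<' then walkB g n memo (st :: path) (st.1, st.2.1 - 1, st.2.2)
        else if c = '*' then walkB g n memo (st :: path) (st.1 + 1, st.2.1, st.2.2 + 1)
        else (false, st :: path)             -- resting cell: the ball stops here

def solution_alt (drum : List String) : Int :=
  match drum with
  | [] => 0          -- Python raises IndexError on len(drum[0]); excluded by Pre_
  | d0 :: rest =>
    let g := List.map (fun s => s.toList) (d0 :: rest)
    ((PySem.List.pyRange 0 (d0.toList.length : Int) 1).foldl
      (fun (acc : Int × PySem.Dict (Int × Int × Int) Bool) p =>
        let r := walkB g (fuelGrid g) acc.2 [] (0, p, 0)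
        (acc.1 + (if r.1 then 1 else 0),
         r.2.foldl (fun m s => m.insert s r.1) acc.2))
      (0, PySem.Dict.empty)).1

-- ===== PRECONDITION & SPEC =====

-- no '>' immediately followed by '<' (a two-cell cycle)
def noGtLt : List Char → Bool
  | a :: b :: t => !(a == '>' && b == '<') && noGtLt (b :: t)
  | _ => true

def rowOK (l : List Char) : Bool :=
  l.all (fun c => c == '#' || c == '<' || c == '>' || c == '*' || c == 'a') &&
  noGtLt l &&
  !(decide (l.head? = some '<') && decide (l.getLast? = some '>'))

-- Pre_ restricts to the puzzle's natural drum alphabet '#' '<' '>' '*' 'a', and excludes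
-- the empty drum (A raises IndexError on len(drum[0])) and the two-cell cycle patterns
-- '>' directly left of '<' and a row starting '<' and ending '>' (reached via Python's
-- negative indexing): whenever the ball reaches a character outside the alphabet or such
-- a cycle, A loops forever; this syntactic condition also drops some grids whose bad
-- cells no ball ever reaches, on which A returns (and agrees with B).  A first row ""
-- makes A return 0 without reading any cell, so such drums are admitted as they are.
def Pre_solution (drum : List String) : Prop :=
  drum ≠ [] ∧ ((drum.head? = some "") ∨ ∀ r ∈ drum, rowOK r.toList = true)
instance (drum : List String) : Decidable (Pre_solution drum) := by
  unfold Pre_solution; infer_instance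

def pvWitness_solution : List String := ["#*", "*<"]

def Spec_solution (drum : List String) (out : Int) : Prop := out = solution_alt drum
instance (drum : List String) (out : Int) : Decidable (Spec_solution drum out) := by
  unfold Spec_solution; infer_instance

-- ===== CLAIM (what is proved, stated in full; the proofs are below) =====
def Claim_equal_solution : Prop :=
  ∀ (drum : List String), Dom_solution drum → Pre_solution drum →
    Spec_solution drum (solution drum)

-- ===== LEMMAS AND PROOFS =====

-- reference outcome of a state: read the cell (off the grid = the ball exits),
-- then the second-star check, then move by the character (non-mover = the ball rests)
def outW (g : List (List Char)) : Nat → Int × Int × Int → Option Bool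
  | 0, _ => none
  | n + 1, st =>
    match cellA g st.1 st.2.1 with
    | none => some true
    | some c =>
      if st.2.2 > 1 then some false
      else if c = '#' then outW g n (st.1 + 1, st.2.1, st.2.2)
      else if c = '>' then outW g n (st.1, st.2.1 + 1, st.2.2)
      else if c = '<' then outW g n (st.1, st.2.1 - 1, st.2.2)
      else if c = '*' then outW g n (st.1 + 1, st.2.1, st.2.2 + 1)
      else some false

def ValidSt (g : List (List Char)) (st : Int × Int × Int) : Prop :=
  0 ≤ st.1 ∧ (cellA g st.1 st.2.1).isSome

def OutS (g : List (List Char)) (st : Int × Int × Int) (b : Bool) : Prop :=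
  ∃ n, outW g n st = some b

def InvM (g : List (List Char)) (memo : PySem.Dict (Int × Int × Int) Bool) : Prop :=
  ∀ st b, memo.get? st = some b → OutS g st b

def PreG (g : List (List Char)) : Prop := ∀ r ∈ g, rowOK r = true

-- potential: rows strictly below, plus horizontal slack in the current row
def Rpot (g : List (List Char)) (y : Nat) : Nat :=
  (((g.drop y).map (fun r => 2 * r.length + 2)).sum)

def hpot (g : List (List Char)) (y p : Int) : Nat :=
  match PySem.List.pyGet? g y with
  | none => 0
  | some row =>
    if PySem.List.pyGet? row p = some '>' then ((row.length : Int) - p).toNat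
    else if PySem.List.pyGet? row p = some '<' then (p + (row.length : Int) + 1).toNat
    else 0

def muSt (g : List (List Char)) (st : Int × Int × Int) : Nat :=
  Rpot g (st.1.toNat + 1) + hpot g st.1 st.2.1


lemma pyGet?_some_range {α : Type} (row : List α) (i : Int) (x : α)
    (h : PySem.List.pyGet? row i = some x) : -(row.length : Int) ≤ i ∧ i < row.length := by
  by_contra hc
  have : PySem.List.pyGet? row i = none := by
    rw [PySem.List.pyGet?_eq_none_iff]
    intro hr
    exact hc ⟨hr.1, hr.2⟩
  rw [this] at h
  simp at h

lemma pyGet?_some_phys (row : List Char) (i : Int) (x : Char)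
    (h : PySem.List.pyGet? row i = some x) :
    ∃ j : Nat, j < row.length ∧ row[j]? = some x ∧
      ((0 ≤ i ∧ (j : Int) = i) ∨ (i < 0 ∧ (j : Int) = row.length + i)) := by
  have hr := pyGet?_some_range row i x h
  by_cases hi : 0 ≤ i
  · rw [PySem.List.pyGet?_of_nonneg row hi] at h
    refine ⟨i.toNat, ?_, h, Or.inl ⟨hi, by omega⟩⟩
    have := List.getElem?_eq_some_iff.mp h
    exact this.1
  · replace hi : i < 0 := by omega
    have hk1 : 0 < (-i).toNat := by omega
    have hk2 : (-i).toNat ≤ row.length := by omega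
    have hik : i = -((-i).toNat : Int) := by omega
    rw [hik, PySem.List.pyGet?_neg_natCast row (-i).toNat hk1 hk2] at h
    refine ⟨row.length - (-i).toNat, ?_, h, Or.inr ⟨hi, by omega⟩⟩
    omega

lemma noGtLt_adj : ∀ (l : List Char), noGtLt l = true →
    ∀ j : Nat, l[j]? = some '>' → l[j + 1]? = some '<' → False := by
  intro l
  induction l with
  | nil => intro _ j h1 _; simp at h1
  | cons a t ih =>
    intro h j h1 h2
    cases t with
    | nil =>
      rcases j with _ | j' <;> simp at h1 h2
    | cons b t' =>
      have h' : ¬(a = '>' ∧ b = '<') ∧ noGtLt (b :: t') = true := by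
        simp [noGtLt] at h
        tauto
      rcases j with _ | j'
      · simp at h1 h2
        exact h'.1 ⟨h1, h2⟩
      · exact ih h'.2 j' (by simpa using h1) (by simpa using h2)

lemma rowOK_parts (l : List Char) (h : rowOK l = true) :
    (∀ c ∈ l, c = '#' ∨ c = '<' ∨ c = '>' ∨ c = '*' ∨ c = 'a') ∧ noGtLt l = true ∧
      ¬(l.head? = some '<' ∧ l.getLast? = some '>') := by
  simp only [rowOK, Bool.and_eq_true, List.all_eq_true, Bool.or_eq_true, beq_iff_eq,
    Bool.not_eq_true', Bool.and_eq_false_iff, decide_eq_false_iff_not] at h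
  obtain ⟨⟨hall, hadj⟩, hhl⟩ := h
  refine ⟨?_, hadj, ?_⟩
  · intro c hc
    have := hall c hc
    tauto
  · intro ⟨hh, hg⟩
    rcases hhl with h | h
    · exact h hh
    · exact h hg

lemma no_cycle_right (row : List Char) (hOK : rowOK row = true) (p : Int) (c' : Char)
    (h1 : PySem.List.pyGet? row p = some '>')
    (h2 : PySem.List.pyGet? row (p + 1) = some c') : c' ≠ '<' := by
  intro hc; subst hc
  obtain ⟨-, hadj, hhl⟩ := rowOK_parts row hOK
  obtain ⟨j1, hj1l, hj1, hj1c⟩ := pyGet?_some_phys row p _ h1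
  obtain ⟨j2, hj2l, hj2, hj2c⟩ := pyGet?_some_phys row (p + 1) _ h2
  by_cases hp1 : p + 1 = 0
  · -- wrap pair: '>' at index -1 (last), '<' at index 0 (head)
    have hj1e : j1 = row.length - 1 := by omega
    have hj2e : j2 = 0 := by omega
    apply hhl
    constructor
    · rw [List.head?_eq_getElem?]
      rw [hj2e] at hj2; exact hj2
    · rw [List.getLast?_eq_getElem?]
      rw [hj1e] at hj1; exact hj1
  · have : j2 = j1 + 1 := by omega
    exact noGtLt_adj row hadj j1 hj1 (this ▸ hj2)

lemma no_cycle_left (row : List Char) (hOK : rowOK row = true) (p : Int) (c' : Char)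
    (h1 : PySem.List.pyGet? row p = some '<')
    (h2 : PySem.List.pyGet? row (p - 1) = some c') : c' ≠ '>' := by
  intro hc; subst hc
  obtain ⟨-, hadj, hhl⟩ := rowOK_parts row hOK
  obtain ⟨j1, hj1l, hj1, hj1c⟩ := pyGet?_some_phys row p _ h1
  obtain ⟨j2, hj2l, hj2, hj2c⟩ := pyGet?_some_phys row (p - 1) _ h2
  by_cases hp0 : p = 0
  · have hj2e : j2 = row.length - 1 := by omega
    have hj1e : j1 = 0 := by omega
    apply hhl
    constructor
    · rw [List.head?_eq_getElem?]
      rw [hj1e] at hj1; exact hj1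
    · rw [List.getLast?_eq_getElem?]
      rw [hj2e] at hj2; exact hj2
  · have : j1 = j2 + 1 := by omega
    exact noGtLt_adj row hadj j2 hj2 (this ▸ hj1)

-- A's loop equals the reference outcome (one fuel step of slack)
lemma loopA_eq (g : List (List Char)) : ∀ (n : Nat) (y p star : Int) (c : Char),
    cellA g y p = some c → star ≤ 1 →
    loopA n g c y p star = (outW g (n + 1) (y, p, star)).getD false := by
  have hout : ∀ (m : Nat) (y p star : Int) (c2 : Char),
      cellA g y p = some c2 → star ≤ 1 → c2 ≠ '#' → c2 ≠ '>' → c2 ≠ '<' → c2 ≠ '*' →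
      (outW g (m + 1) (y, p, star)).getD false = false := by
    intro m y p star c2 h2 hstar n1 n2 n3 n4
    rw [outW]
    simp [h2, show ¬ star > 1 by omega, n1, n2, n3, n4]
  intro n
  induction n with
  | zero =>
    intro y p star c hc hstar
    rw [outW]
    simp only [loopA, hc, if_neg (show ¬ star > 1 by omega)]
    split_ifs <;> simp [outW]
  | succ n ih =>
    intro y p star c hc hstar
    rw [loopA]
    conv_rhs => rw [outW]
    simp only [hc, if_neg (show ¬ star > 1 by omega)]
    by_cases h1 : c = '#'
    · subst h1
      simp only [reduceIte]
      cases h2 : cellA g (y + 1) p with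
      | none => simp [direction, h2, outW]
      | some c2 =>
        simp only [direction, h2, reduceIte]
        by_cases hca : c2 = 'a'
        · subst hca
          rw [if_pos rfl]
          exact (hout n (y + 1) p star 'a' h2 hstar (by decide) (by decide) (by decide)
            (by decide)).symm
        · rw [if_neg hca]
          exact ih (y + 1) p star c2 h2 hstar
    · rw [if_neg h1]
      by_cases h3 : c = '>'
      · subst h3
        simp only [reduceIte]
        cases h2 : cellA g y (p + 1) with
        | none => simp [direction, h2, outW]
        | some c2 =>
          simp only [direction, h2, reduceIte,
            if_neg (show ¬('>' : Char) = '#' by decide)]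
          by_cases hca : c2 = 'a'
          · subst hca
            rw [if_pos rfl]
            exact (hout n y (p + 1) star 'a' h2 hstar (by decide) (by decide) (by decide)
              (by decide)).symm
          · rw [if_neg hca]
            exact ih y (p + 1) star c2 h2 hstar
      · rw [if_neg h3]
        by_cases h4 : c = '<'
        · subst h4
          simp only [reduceIte]
          cases h2 : cellA g y (p - 1) with
          | none => simp [direction, h2, outW]
          | some c2 =>
            simp only [direction, h2, reduceIte,
              if_neg (show ¬('<' : Char) = '#' by decide),
              if_neg (show ¬('<' : Char) = '>' by decide)]
            by_cases hca : c2 = 'a'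
            · subst hca
              rw [if_pos rfl]
              exact (hout n y (p - 1) star 'a' h2 hstar (by decide) (by decide) (by decide)
                (by decide)).symm
            · rw [if_neg hca]
              exact ih y (p - 1) star c2 h2 hstar
        · rw [if_neg h4]
          by_cases h5 : c = '*'
          · subst h5
            simp only [reduceIte]
            cases h2 : cellA g (y + 1) p with
            | none => simp [direction, h2, outW]
            | some c2 =>
              by_cases h6 : star + 1 > 1
              · simp only [direction, h2, reduceIte, if_pos h6,
                  if_neg (show ¬('*' : Char) = '#' by decide),
                  if_neg (show ¬('*' : Char) = '>' by decide),
                  if_neg (show ¬('*' : Char) = '<' by decide)]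
                rw [outW]
                simp [h2, h6]
              · simp only [direction, h2, reduceIte, if_neg h6,
                  if_neg (show ¬('*' : Char) = '#' by decide),
                  if_neg (show ¬('*' : Char) = '>' by decide),
                  if_neg (show ¬('*' : Char) = '<' by decide)]
                by_cases hca : c2 = 'a'
                · subst hca
                  rw [if_pos rfl]
                  exact (hout n (y + 1) p (star + 1) 'a' h2 (by omega) (by decide)
                    (by decide) (by decide) (by decide)).symm
                · rw [if_neg hca]
                  exact ih (y + 1) p (star + 1) c2 h2 (by omega)
          · rw [if_neg h5]
            by_cases h7 : c = 'a'
            · subst h7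
              simp [direction]
            · simp only [direction, if_neg h1, if_neg h3, if_neg h4, if_neg h5, if_neg h7]
              rw [ih y p star c hc hstar]
              simp [hout n y p star c hc hstar h1 h3 h4 h5]

lemma outW_mono (g : List (List Char)) :
    ∀ (n : Nat) (st : Int × Int × Int) (b : Bool), outW g n st = some b →
    ∀ m, n ≤ m → outW g m st = some b := by
  intro n
  induction n with
  | zero => intro st b h; simp [outW] at h
  | succ n ih =>
    intro st b h m hm
    match m, hm with
    | m + 1, hm =>
      rw [outW] at h ⊢
      cases hc : cellA g st.1 st.2.1 with
      | none => simp only [hc] at h ⊢; exact h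
      | some c =>
        simp only [hc] at h ⊢
        by_cases hstar : st.2.2 > 1
        · rw [if_pos hstar] at h ⊢; exact h
        · rw [if_neg hstar] at h ⊢
          split_ifs at h ⊢ <;> first
            | exact h
            | exact ih _ b h m (by omega)

lemma outS_unique (g : List (List Char)) (st : Int × Int × Int) (b b' : Bool)
    (h : OutS g st b) (n : Nat) (h' : outW g n st = some b') : b = b' := by
  obtain ⟨m, hm⟩ := h
  have h1 := outW_mono g m st b hm (m + n) (by omega)
  have h2 := outW_mono g n st b' h' (m + n) (by omega)
  rw [h1] at h2
  exact (Option.some.injEq _ _).mp h2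

lemma cellB_eq_cellA (g : List (List Char)) (y p : Int) :
    cellB g y p = cellA g y p := by
  unfold cellB cellA
  cases PySem.List.pyGet? g y <;> rfl

lemma Rpot_nil (y : Nat) : Rpot [] y = 0 := by
  simp [Rpot]

lemma Rpot_cons_zero (a : List Char) (t : List (List Char)) :
    Rpot (a :: t) 0 = 2 * a.length + 2 + Rpot t 0 := by
  simp [Rpot]

lemma Rpot_cons_succ (a : List Char) (t : List (List Char)) (y : Nat) :
    Rpot (a :: t) (y + 1) = Rpot t y := by
  simp [Rpot]

lemma Rpot_succ_le (g : List (List Char)) : ∀ (y : Nat), Rpot g (y + 1) ≤ Rpot g y := by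
  induction g with
  | nil => intro y; simp [Rpot_nil]
  | cons a t ih =>
    intro y
    cases y with
    | zero => rw [Rpot_cons_succ, Rpot_cons_zero]; omega
    | succ y' => rw [Rpot_cons_succ, Rpot_cons_succ]; exact ih y'

lemma Rpot_le_zero (g : List (List Char)) : ∀ (y : Nat), Rpot g y ≤ Rpot g 0 := by
  intro y
  induction y with
  | zero => exact le_refl _
  | succ y' ih => exact le_trans (Rpot_succ_le g y') ih

lemma Rpot_succ (g : List (List Char)) (y : Nat) (row : List Char)
    (h : PySem.List.pyGet? g (y : Int) = some row) :
    Rpot g y = 2 * row.length + 2 + Rpot g (y + 1) := by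
  rw [PySem.List.pyGet?_of_nonneg g (by omega)] at h
  have hy : y < g.length := (List.getElem?_eq_some_iff.mp (by simpa using h)).1
  have hrow : g[y] = row := by
    have := List.getElem?_eq_some_iff.mp (by simpa using h)
    exact this.2
  unfold Rpot
  rw [List.drop_eq_getElem_cons hy]
  simp [hrow]

lemma hpot_le (g : List (List Char)) (y p : Int) (row : List Char)
    (h : PySem.List.pyGet? g y = some row) : hpot g y p ≤ 2 * row.length + 1 := by
  simp only [hpot, h]
  by_cases h1 : PySem.List.pyGet? row p = some '>'
  · rw [if_pos h1]
    have := pyGet?_some_range row p _ h1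
    omega
  · rw [if_neg h1]
    by_cases h2 : PySem.List.pyGet? row p = some '<'
    · rw [if_pos h2]
      have := pyGet?_some_range row p _ h2
      omega
    · rw [if_neg h2]; omega

lemma cellA_destruct (g : List (List Char)) (y p : Int) (c : Char)
    (h : cellA g y p = some c) :
    ∃ row, PySem.List.pyGet? g y = some row ∧ PySem.List.pyGet? row p = some c := by
  unfold cellA at h
  cases hrow : PySem.List.pyGet? g y with
  | none => rw [hrow] at h; simp at h
  | some row => rw [hrow] at h; exact ⟨row, rfl, h⟩

lemma cellA_of_row (g : List (List Char)) (y p : Int) (row : List Char)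
    (h : PySem.List.pyGet? g y = some row) : cellA g y p = PySem.List.pyGet? row p := by
  unfold cellA; rw [h]

-- hpot at a cell whose char is not a direction char (or out of range) is 0
lemma hpot_eq_right (g : List (List Char)) (y p : Int) (row : List Char) (c : Char)
    (hrow : PySem.List.pyGet? g y = some row) (hcp : PySem.List.pyGet? row p = some c) :
    hpot g y p = if c = '>' then ((row.length : Int) - p).toNat
      else if c = '<' then (p + (row.length : Int) + 1).toNat else 0 := by
  simp only [hpot, hrow, hcp]
  by_cases h1 : c = '>'
  · subst h1; simp
  · rw [if_neg (by simp [h1]), if_neg h1]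
    by_cases h2 : c = '<'
    · subst h2; simp
    · rw [if_neg (by simp [h2]), if_neg h2]

lemma down_mu (g : List (List Char)) (y p p' : Int) (star star' : Int) (row2 : List Char)
    (hy : 0 ≤ y) (hrow2 : PySem.List.pyGet? g (y + 1) = some row2) :
    muSt g (y + 1, p', star') < muSt g (y, p, star) := by
  have e3 : (y + 1).toNat = y.toNat + 1 := by omega
  have ecast : ((y.toNat + 1 : Nat) : Int) = y + 1 := by omega
  have e1 : Rpot g (y.toNat + 1) = 2 * row2.length + 2 + Rpot g (y.toNat + 2) :=
    Rpot_succ g (y.toNat + 1) row2 (by rw [ecast]; exact hrow2)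
  have e2 : hpot g (y + 1) p' ≤ 2 * row2.length + 1 := hpot_le g (y + 1) p' row2 hrow2
  have e5 : y.toNat + 1 + 1 = y.toNat + 2 := by omega
  simp only [muSt, e3, e5]
  omega

-- the move from a valid state to a valid state strictly decreases the potential
lemma move_decreases (g : List (List Char)) (hg : PreG g) (y p star : Int)
    (st' : Int × Int × Int) (hy : 0 ≤ y) (c : Char) (hc : cellA g y p = some c)
    (hv' : (cellA g st'.1 st'.2.1).isSome)
    (hmv : (c = '#' ∧ st' = (y + 1, p, star)) ∨ (c = '>' ∧ st' = (y, p + 1, star)) ∨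
           (c = '<' ∧ st' = (y, p - 1, star)) ∨ (c = '*' ∧ st' = (y + 1, p, star + 1))) :
    muSt g st' < muSt g (y, p, star) := by
  obtain ⟨row, hrow, hcp⟩ := cellA_destruct g y p c hc
  have hrowOK : rowOK row = true := hg row (PySem.List.mem_of_pyGet?_eq_some g hrow)
  obtain ⟨c', hc'⟩ := Option.isSome_iff_exists.mp hv'
  rcases hmv with ⟨h1, rfl⟩ | ⟨h1, rfl⟩ | ⟨h1, rfl⟩ | ⟨h1, rfl⟩
  · obtain ⟨row2, hrow2, -⟩ := cellA_destruct g (y + 1) p c' hc'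
    exact down_mu g y p p star star row2 hy hrow2
  · subst h1
    have hcp2 : PySem.List.pyGet? row (p + 1) = some c' := by
      rw [← cellA_of_row g y (p + 1) row hrow]; exact hc'
    have hpr := pyGet?_some_range row p _ hcp
    have hpr2 := pyGet?_some_range row (p + 1) c' hcp2
    have hne : c' ≠ '<' := no_cycle_right row hrowOK p c' hcp hcp2
    have hh1 : hpot g y p = ((row.length : Int) - p).toNat := by
      rw [hpot_eq_right g y p row '>' hrow hcp]; simp
    have hh2 : hpot g y (p + 1) ≤ ((row.length : Int) - (p + 1)).toNat := by
      rw [hpot_eq_right g y (p + 1) row c' hrow hcp2]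
      by_cases hcg : c' = '>'
      · rw [if_pos hcg]
      · rw [if_neg hcg, if_neg hne]; omega
    simp only [muSt]
    omega
  · subst h1
    have hcp2 : PySem.List.pyGet? row (p - 1) = some c' := by
      rw [← cellA_of_row g y (p - 1) row hrow]; exact hc'
    have hpr := pyGet?_some_range row p _ hcp
    have hpr2 := pyGet?_some_range row (p - 1) c' hcp2
    have hne : c' ≠ '>' := no_cycle_left row hrowOK p c' hcp hcp2
    have hh1 : hpot g y p = (p + (row.length : Int) + 1).toNat := by
      rw [hpot_eq_right g y p row '<' hrow hcp]; simp
    have hh2 : hpot g y (p - 1) ≤ (p + (row.length : Int)).toNat := by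
      rw [hpot_eq_right g y (p - 1) row c' hrow hcp2]
      rw [if_neg hne]
      by_cases hcg : c' = '<'
      · rw [if_pos hcg]; omega
      · rw [if_neg hcg]; omega
    simp only [muSt]
    omega
  · obtain ⟨row2, hrow2, -⟩ := cellA_destruct g (y + 1) p c' hc'
    exact down_mu g y p p star (star + 1) row2 hy hrow2

lemma termination_outW (g : List (List Char)) (hg : PreG g) :
    ∀ (k : Nat) (st : Int × Int × Int), ValidSt g st → muSt g st < k →
    (outW g (k + 1) st).isSome := by
  intro k
  induction k with
  | zero => intro st _ h; omega
  | succ k ih =>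
    intro st hv hmu
    obtain ⟨hy, hsome⟩ := hv
    obtain ⟨c, hc⟩ := Option.isSome_iff_exists.mp hsome
    rw [outW]
    simp only [hc]
    by_cases hstar : st.2.2 > 1
    · rw [if_pos hstar]; rfl
    · rw [if_neg hstar]
      have step : ∀ st' : Int × Int × Int,
          ((c = '#' ∧ st' = (st.1 + 1, st.2.1, st.2.2)) ∨
           (c = '>' ∧ st' = (st.1, st.2.1 + 1, st.2.2)) ∨
           (c = '<' ∧ st' = (st.1, st.2.1 - 1, st.2.2)) ∨
           (c = '*' ∧ st' = (st.1 + 1, st.2.1, st.2.2 + 1))) → 0 ≤ st'.1 →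
          (outW g (k + 1) st').isSome := by
        intro st' hmv hy'
        cases hc' : cellA g st'.1 st'.2.1 with
        | none => rw [outW]; simp [hc']
        | some c' =>
          have hv' : ValidSt g st' := ⟨hy', by rw [hc']; rfl⟩
          have hlt : muSt g st' < muSt g st := move_decreases g hg st.1 st.2.1 st.2.2 st' hy c hc
            (by rw [hc']; rfl) (by simpa using hmv)
          exact ih st' hv' (by omega)
      split_ifs with h1 h2 h3 h4
      · exact step _ (by tauto) (by simp; omega)
      · exact step _ (by tauto) (by simpa using hy)
      · exact step _ (by tauto) (by simpa using hy)
      · exact step _ (by tauto) (by simp; omega)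
      · rfl

lemma mu_lt_fuel (g : List (List Char)) (st : Int × Int × Int) (hv : ValidSt g st) :
    muSt g st + 2 ≤ fuelGrid g := by
  obtain ⟨y, p, star⟩ := st
  obtain ⟨hy, hsome⟩ := hv
  obtain ⟨c, hc⟩ := Option.isSome_iff_exists.mp hsome
  obtain ⟨row, hrow, hcp⟩ := cellA_destruct g y p c hc
  have ecast : ((y.toNat : Nat) : Int) = y := by omega
  have e1 : Rpot g y.toNat = 2 * row.length + 2 + Rpot g (y.toNat + 1) :=
    Rpot_succ g y.toNat row (by rw [ecast]; exact hrow)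
  have e2 : hpot g y p ≤ 2 * row.length + 1 := hpot_le g y p row hrow
  have e3 : Rpot g y.toNat ≤ Rpot g 0 := Rpot_le_zero g y.toNat
  have e4 : fuelGrid g = Rpot g 0 + 2 := by simp [fuelGrid, Rpot]
  simp only [muSt]
  omega

lemma walkB_correct (g : List (List Char)) :
    ∀ (n fuel : Nat) (memo : PySem.Dict (Int × Int × Int) Bool)
      (path : List (Int × Int × Int)) (st : Int × Int × Int) (b : Bool),
    InvM g memo → outW g n st = some b → n ≤ fuel →
    ∃ L, walkB g fuel memo path st = (b, L ++ path) ∧ ∀ s ∈ L, OutS g s b := by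
  intro n
  induction n with
  | zero => intro fuel memo path st b _ h _; simp [outW] at h
  | succ n ih =>
    intro fuel memo path st b hm h hf
    match fuel, hf with
    | fuel + 1, hf =>
      have hOut : OutS g st b := ⟨n + 1, h⟩
      rw [walkB]
      cases hmem : memo.get? st with
      | some out =>
        have hob : out = b := outS_unique g st out b (hm st out hmem) (n + 1) h
        subst hob
        exact ⟨[], rfl, by simp⟩
      | none =>
        rw [outW] at h
        rw [cellB_eq_cellA]
        cases hc : cellA g st.1 st.2.1 with
        | none =>
          simp only [hc] at h ⊢
          have hb : b = true := by simpa using h.symm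
          subst hb
          exact ⟨[st], rfl, by intro s hs; simp at hs; rw [hs]; exact hOut⟩
        | some c =>
          simp only [hc] at h ⊢
          by_cases hstar : st.2.2 > 1
          · rw [if_pos hstar] at h ⊢
            have hb : b = false := by simpa using h.symm
            subst hb
            exact ⟨[st], rfl, by intro s hs; simp at hs; rw [hs]; exact hOut⟩
          · rw [if_neg hstar] at h ⊢
            have tail : ∀ st' : Int × Int × Int,
                outW g n st' = some b →
                walkB g fuel memo (st :: path) st' =
                  (walkB g fuel memo (st :: path) st') →
                ∃ L, walkB g fuel memo (st :: path) st' = (b, L ++ path) ∧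
                  ∀ s ∈ L, OutS g s b := by
              intro st' h' _
              obtain ⟨L', hw', hL'⟩ := ih fuel memo (st :: path) st' b hm h' (by omega)
              refine ⟨L' ++ [st], ?_, ?_⟩
              · rw [hw']; simp
              · intro s hs
                rcases List.mem_append.mp hs with hsl | hsr
                · exact hL' s hsl
                · simp at hsr; rw [hsr]; exact hOut
            split_ifs at h ⊢
            · exact tail _ h rfl
            · exact tail _ h rfl
            · exact tail _ h rfl
            · exact tail _ h rfl
            · have hb : b = false := by simpa using h.symm
              subst hb
              exact ⟨[st], rfl, by intro s hs; simp at hs; rw [hs]; exact hOut⟩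

lemma inv_backfill (g : List (List Char)) (b : Bool) :
    ∀ (L : List (Int × Int × Int)) (memo : PySem.Dict (Int × Int × Int) Bool),
    InvM g memo → (∀ s ∈ L, OutS g s b) →
    InvM g (L.foldl (fun m s => m.insert s b) memo) := by
  intro L
  induction L with
  | nil => intro memo h _; exact h
  | cons a t ih =>
    intro memo hm hL
    simp only [List.foldl_cons]
    apply ih
    · intro st b' hst
      rw [PySem.Dict.get?_insert] at hst
      by_cases he : st = a
      · rw [if_pos he] at hst
        have hb : b = b' := (Option.some.injEq _ _).mp hst
        rw [he, ← hb]
        exact hL a (by simp)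
      · rw [if_neg he] at hst
        exact hm st b' hst
    · intro s hs
      exact hL s (List.mem_cons_of_mem _ hs)

lemma fold_eq (g : List (List Char)) (r0 : List Char) (rest : List (List Char))
    (hg : PreG g) (hge : g = r0 :: rest) :
    ∀ (l : List Int), (∀ p ∈ l, 0 ≤ p ∧ p < (r0.length : Int)) →
    ∀ (k : Int) (memo : PySem.Dict (Int × Int × Int) Bool), InvM g memo →
    l.foldl (fun k p =>
        match PySem.List.pyGet? r0 p with
        | none => k
        | some st => if loopA (fuelGrid g) g st 0 p 0 then k + 1 else k) k
      =
    (l.foldl (fun (acc : Int × PySem.Dict (Int × Int × Int) Bool) p =>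
        let r := walkB g (fuelGrid g) acc.2 [] (0, p, 0)
        (acc.1 + (if r.1 then 1 else 0),
         r.2.foldl (fun m s => m.insert s r.1) acc.2)) (k, memo)).1 := by
  intro l
  induction l with
  | nil => intro _ k memo _; rfl
  | cons p t ih =>
    intro hval k memo hm
    have hp : 0 ≤ p ∧ p < (r0.length : Int) := hval p (by simp)
    have hc0 : PySem.List.pyGet? r0 p = some r0[p.toNat] := by
      exact PySem.List.pyGet?_eq_some_getElem r0 hp.1 hp.2
    have hcell : cellA g 0 p = some r0[p.toNat] := by
      rw [hge]
      unfold cellA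
      simp only [PySem.List.pyGet?_zero_cons]
      exact hc0
    have hv : ValidSt g (0, p, 0) := ⟨le_refl 0, by rw [hcell]; rfl⟩
    have hfu : muSt g (0, p, 0) + 2 ≤ fuelGrid g := mu_lt_fuel g _ hv
    have hsome := termination_outW g hg (muSt g (0, p, 0) + 1) _ hv (by omega)
    obtain ⟨b, hb⟩ := Option.isSome_iff_exists.mp hsome
    have hA : loopA (fuelGrid g) g r0[p.toNat] 0 p 0 = b := by
      rw [loopA_eq g (fuelGrid g) 0 p 0 _ hcell (by norm_num),
        outW_mono g _ _ b hb (fuelGrid g + 1) (by omega)]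
      rfl
    obtain ⟨L, hw, hL⟩ := walkB_correct g (muSt g (0, p, 0) + 2) (fuelGrid g) memo []
      (0, p, 0) b hm hb (by omega)
    rw [List.append_nil] at hw
    simp only [List.foldl_cons, hc0, hA, hw]
    have hke : (if b then k + 1 else k) = k + (if b then (1 : Int) else 0) := by
      cases b <;> simp
    rw [hke]
    exact ih (fun q hq => hval q (by simp [hq])) _ _
      (inv_backfill g b L memo hm hL)
  
-- ===== VERDICT (by name: the statement is the Claim_ definition above) =====
theorem solution_spec : Claim_equal_solution := by
  intro drum _hDom hPre
  unfold Spec_solution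
  obtain ⟨hne, hrows⟩ := hPre
  match drum with
  | [] => exact absurd rfl hne
  | d0 :: rest =>
    rcases hrows with hempty | hrows
    · -- first row "": A iterates over no columns; both sides return 0
      have h0 : d0 = "" := by simpa using hempty
      subst h0
      rfl
    · show solution (d0 :: rest) = solution_alt (d0 :: rest)
      have hg : PreG (List.map (fun s => s.toList) (d0 :: rest)) := by
        intro r hr
        rcases List.mem_map.mp hr with ⟨s, hs, rfl⟩
        exact hrows s hs
      simp only [solution, solution_alt]
      rw [fold_eq (List.map (fun s => s.toList) (d0 :: rest)) d0.toList
          (List.map (fun s => s.toList) rest) hg rfl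
          (PySem.List.pyRange 0 (d0.toList.length : Int) 1)
          (by intro p hp; exact PySem.List.mem_pyRange_one.mp hp)
          0 PySem.Dict.empty
          (by intro st b h; simp [PySem.Dict.get?_empty] at h)]
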